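-- pv_equiv track=rewrite | github.com/grapheneaffiliate/h4-polytopic-attention | arc_final.py | solve_746b3537
-- ===== SOURCE A (Python) =====
-- def solve_746b3537(grid):
--     deduped = [grid[0]]
--     for r in range(1, len(grid)):
--         if grid[r] != grid[r - 1]:
--             deduped.append(grid[r])
--     if not deduped:
--         return deduped
--     ncols = len(deduped[0])
--     keep = [0]
--     for c in range(1, ncols):
--         col_curr = [deduped[r][c] for r in range(len(deduped))]
--         col_prev = [deduped[r][c - 1] for r in range(len(deduped))]
--         if col_curr != col_prev:
--             keep.append(c)
--     return [[row[c] for c in keep] for row in deduped]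
-- ===== SOURCE B (Python) =====
-- def solve_746b3537(grid):
--     prev = grid[0]
--     diff = [a != b for a, b in zip(prev[1:], prev)]
--     kept = [prev]
--     for row in grid[1:]:
--         if row != prev:
--             kept.append(row)
--             diff = [d or a != b for d, (a, b) in zip(diff, zip(row[1:], row))]
--             prev = row
--     return [[row[0]] + [a for a, d in zip(row[1:], diff) if d] for row in kept]
-- ===== Notes on version B (the rewrite author's own statement) =====
-- stated objective: alternative
-- what changed: B replaces A's staged per-column passes (extract each column list, compare with the previous, collect a keep-index list, re-index every row) with one fused pass over the rows that deduplicates consecutive rows while OR-accumulating a boolean adjacent-column-difference mask via zips, then filters each kept row's tail by the mask with no index arithmetic.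
import Mathlib
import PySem

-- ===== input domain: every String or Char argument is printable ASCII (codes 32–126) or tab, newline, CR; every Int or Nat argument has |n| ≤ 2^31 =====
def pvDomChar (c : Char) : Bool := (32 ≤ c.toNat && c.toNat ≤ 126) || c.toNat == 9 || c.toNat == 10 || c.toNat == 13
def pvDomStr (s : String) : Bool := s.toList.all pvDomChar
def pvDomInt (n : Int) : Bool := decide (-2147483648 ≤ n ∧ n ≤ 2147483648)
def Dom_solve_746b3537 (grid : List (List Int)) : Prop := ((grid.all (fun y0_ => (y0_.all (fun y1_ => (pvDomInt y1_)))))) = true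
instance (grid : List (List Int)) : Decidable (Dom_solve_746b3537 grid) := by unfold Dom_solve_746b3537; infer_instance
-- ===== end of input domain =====

-- B makes one fused pass over the rows: it deduplicates consecutive rows while OR-accumulating a
-- boolean adjacent-column-difference mask, then filters each kept row's tail by that mask — no
-- per-column lists and no index bookkeeping; objective: alternative decomposition.

-- ===== PORT A =====
def solve_746b3537 (grid : List (List Int)) : List (List Int) :=
  let deduped := (PySem.List.pyRange 1 (grid.length : Int) 1).foldl
    (fun acc r =>
      if PySem.List.pyGetD grid r [] ≠ PySem.List.pyGetD grid (r - 1) [] then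
        acc ++ [PySem.List.pyGetD grid r []]
      else acc)
    [PySem.List.pyGetD grid 0 []]
  if deduped = [] then deduped
  else
    let ncols : Int := (PySem.List.pyGetD deduped 0 []).length
    let keep := (PySem.List.pyRange 1 ncols 1).foldl
      (fun acc c =>
        let colCurr := (PySem.List.pyRange 0 (deduped.length : Int) 1).map
          (fun r => PySem.List.pyGetD (PySem.List.pyGetD deduped r []) c 0)
        let colPrev := (PySem.List.pyRange 0 (deduped.length : Int) 1).map
          (fun r => PySem.List.pyGetD (PySem.List.pyGetD deduped r []) (c - 1) 0)
        if colCurr ≠ colPrev then acc ++ [c] else acc)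
      [(0 : Int)]
    deduped.map (fun row => keep.map (fun c => PySem.List.pyGetD row c 0))

-- ===== PORT B =====
-- single fused pass; state = (kept rows, column-difference mask, previous kept row)
-- zip(xs, ys) is List.zip (both truncate to the shorter list)
def solve_746b3537_alt (grid : List (List Int)) : List (List Int) :=
  let prev0 := PySem.List.pyGetD grid 0 []
  let diff0 := ((PySem.List.slice prev0 (some 1) none).zip prev0).map
    (fun p => decide (p.1 ≠ p.2))
  let s := (PySem.List.slice grid (some 1) none).foldl
    (fun (s : List (List Int) × List Bool × List Int) row =>
      if row ≠ s.2.2 then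
        (s.1 ++ [row],
         (s.2.1.zip ((PySem.List.slice row (some 1) none).zip row)).map
           (fun p => p.1 || decide (p.2.1 ≠ p.2.2)),
         row)
      else s)
    ([prev0], diff0, prev0)
  s.1.map (fun row =>
    PySem.List.pyGetD row 0 0 ::
      (((PySem.List.slice row (some 1) none).zip s.2.1).filter (fun p => p.2)).map (fun p => p.1))

-- ===== PRECONDITION & SPEC =====
-- Pre_ excludes exactly the inputs on which A raises IndexError: the empty grid, a grid whose
-- first row is empty, and grids in which some row is shorter than the first row.
def Pre_solve_746b3537 (grid : List (List Int)) : Prop :=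
  grid ≠ [] ∧ 1 ≤ (grid.headD []).length ∧ ∀ row ∈ grid, (grid.headD []).length ≤ row.length
instance (grid : List (List Int)) : Decidable (Pre_solve_746b3537 grid) := by
  unfold Pre_solve_746b3537; infer_instance

def pvWitness_solve_746b3537 : List (List Int) := [[1, 2], [1, 2], [3, 3]]

def Spec_solve_746b3537 (grid : List (List Int)) (out : List (List Int)) : Prop := out = solve_746b3537_alt grid
instance (grid : List (List Int)) (out : List (List Int)) : Decidable (Spec_solve_746b3537 grid out) := by unfold Spec_solve_746b3537; infer_instance

-- ===== CLAIM (what is proved, stated in full; the proofs are below) =====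
def Claim_equal_solve_746b3537 : Prop := ∀ (grid : List (List Int)), Dom_solve_746b3537 grid → Pre_solve_746b3537 grid → Spec_solve_746b3537 grid (solve_746b3537 grid)

-- ===== LEMMAS AND PROOFS =====

-- canonical consecutive-dedup of the tail, carrying the PREVIOUS original element
def gDedup {α : Type} [DecidableEq α] (p : α) : List α → List α
  | [] => []
  | x :: xs => if x = p then gDedup x xs else x :: gDedup x xs

def colF (D : List (List Int)) (c : Int) : List Int :=
  D.map (fun row => PySem.List.pyGetD row c 0)

def keepL (D : List (List Int)) (n : Int) : List Int :=
  0 :: (PySem.List.pyRange 1 n 1).filter (fun c => decide (¬ colF D c = colF D (c - 1)))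

def canonOut (D : List (List Int)) (n : Int) : List (List Int) :=
  D.map (fun row => (keepL D n).map (fun c => PySem.List.pyGetD row c 0))

theorem mem_gDedup {α : Type} [DecidableEq α] {p y : α} {xs : List α}
    (h : y ∈ gDedup p xs) : y ∈ xs := by
  induction xs generalizing p with
  | nil => simp [gDedup] at h
  | cons x xs ih =>
    simp only [gDedup] at h
    by_cases hx : x = p
    · simp only [if_pos hx] at h
      exact List.mem_cons_of_mem _ (ih h)
    · simp only [if_neg hx, List.mem_cons] at h
      rcases h with h | h
      · simp [h]
      · exact List.mem_cons_of_mem _ (ih h)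

-- an index-filtered contiguous range, mapped through f, IS gDedup of the mapped range
theorem gDedup_pyRange {α : Type} [DecidableEq α] (f : Int → α) :
    ∀ (m : Nat) (a b : Int), b - (a + 1) = (m : Int) →
      gDedup (f a) ((PySem.List.pyRange (a + 1) b 1).map f)
        = ((PySem.List.pyRange (a + 1) b 1).filter (fun c => decide (¬ f c = f (c - 1)))).map f := by
  intro m
  induction m with
  | zero =>
    intro a b h
    rw [PySem.List.pyRange_one_eq_nil (by omega)]
    simp [gDedup]
  | succ k ih =>
    intro a b h
    rw [PySem.List.pyRange_one_cons (by omega : a + 1 < b)]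
    have ha : a + 1 - 1 = a := by ring
    have ih' := ih (a + 1) b (by omega)
    simp only [List.map_cons, List.filter_cons, ha, gDedup]
    by_cases hc : f (a + 1) = f a
    · rw [if_pos hc, ih']
      simp [hc]
    · rw [if_neg hc, ih']
      simp [hc]

-- '[f(deduped[r]) for r in range(len(deduped))]' collapses to a map over the rows
theorem map_index {β : Type} (D : List (List Int)) (h : List Int → β) :
    (PySem.List.pyRange 0 (D.length : Int) 1).map (fun r => h (PySem.List.pyGetD D r [])) = D.map h := by
  conv_rhs => rw [← PySem.List.map_pyGetD_pyRange_zero' D ([] : List Int)]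
  rw [List.map_map]
  rfl

theorem solve_eq_canon (x : List Int) (xs : List (List Int)) :
    solve_746b3537 (x :: xs) = canonOut (x :: gDedup x xs) (x.length : Int) := by
  simp only [solve_746b3537]
  rw [PySem.List.foldl_append_ite
        (fun r => ¬ PySem.List.pyGetD (x :: xs) r [] = PySem.List.pyGetD (x :: xs) (r - 1) [])
        (fun r => PySem.List.pyGetD (x :: xs) r [])]
  have hg := gDedup_pyRange (fun r => PySem.List.pyGetD (x :: xs) r []) xs.length 0
      ((x :: xs).length : Int) (by simp)
  norm_num at hg
  have hmap : (PySem.List.pyRange 1 ((xs.length : Int) + 1) 1).map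
      (fun r => PySem.List.pyGetD (x :: xs) r []) = xs := by
    have := PySem.List.map_pyGetD_pyRange' (x :: xs) ([] : List Int) (a := 1) (by norm_num)
    simpa using this
  have hded : [PySem.List.pyGetD (x :: xs) 0 []] ++
      ((PySem.List.pyRange 1 ((x :: xs).length : Int) 1).filter
        (fun c => decide (¬ PySem.List.pyGetD (x :: xs) c [] = PySem.List.pyGetD (x :: xs) (c - 1) []))).map
        (fun r => PySem.List.pyGetD (x :: xs) r []) = x :: gDedup x xs := by
    simp only [decide_not, List.length_cons]
    push_cast
    rw [← hg, hmap]
    simp [PySem.List.pyGetD_zero_cons]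
  rw [hded]
  rw [if_neg (by simp)]
  have hcol : ∀ c : Int, (PySem.List.pyRange 0 (((x :: gDedup x xs).length : Int)) 1).map
      (fun r => PySem.List.pyGetD (PySem.List.pyGetD (x :: gDedup x xs) r []) c 0)
        = colF (x :: gDedup x xs) c := fun c => map_index _ (fun row => PySem.List.pyGetD row c 0)
  simp only [hcol]
  rw [PySem.List.foldl_append_ite_eq_filter
        (fun c => ¬ colF (x :: gDedup x xs) c = colF (x :: gDedup x xs) (c - 1))]
  simp only [PySem.List.pyGetD_zero_cons]
  simp [canonOut, keepL]


-- ===== B-SIDE LEMMAS =====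

-- column-difference mask: mask entry for column c = some kept row differs at c vs c-1
def maskP (K : List (List Int)) (c : Int) : Bool :=
  K.any (fun row => decide (¬ PySem.List.pyGetD row c 0 = PySem.List.pyGetD row (c - 1) 0))

def maskL (K : List (List Int)) (n : Int) : List Bool :=
  (PySem.List.pyRange 1 n 1).map (maskP K)

theorem zip_take_left {α β : Type} (l1 : List α) (l2 : List β) :
    l1.zip l2 = (l1.take l2.length).zip l2 := by
  induction l1 generalizing l2 with
  | nil => simp
  | cons a l ih =>
    cases l2 with
    | nil => simp
    | cons b t => simp [List.zip_cons_cons, ih t]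

theorem zip_take_right {α β : Type} (l1 : List α) (l2 : List β) :
    l1.zip l2 = l1.zip (l2.take l1.length) := by
  induction l1 generalizing l2 with
  | nil => simp
  | cons a l ih =>
    cases l2 with
    | nil => simp
    | cons b t => simp [List.zip_cons_cons, ih t]

-- the first n-1 adjacent pairs (row[c], row[c-1]) as an index map
theorem pairRange (row : List Int) (n : Nat) (h : n ≤ row.length) :
    (PySem.List.pyRange 1 (n : Int) 1).map
        (fun c => (PySem.List.pyGetD row c 0, PySem.List.pyGetD row (c - 1) 0))
      = (row.tail.zip row).take (n - 1) := by
  apply List.ext_getElem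
  · simp [PySem.List.length_pyRange_one]
    omega
  · intro i h1 h2
    simp only [List.getElem_map, PySem.List.getElem_pyRange_one, List.getElem_take,
      List.getElem_zip, List.getElem_tail]
    have hi : i < n - 1 := by
      simpa [PySem.List.length_pyRange_one] using h1
    have e1 : (1 : Int) + (i : Int) = ((i + 1 : Nat) : Int) := by omega
    have e2 : (1 : Int) + (i : Int) - 1 = ((i : Nat) : Int) := by omega
    rw [e2, e1, PySem.List.pyGetD_natCast, PySem.List.pyGetD_natCast,
      List.getD_eq_getElem _ _ (by omega), List.getD_eq_getElem _ _ (by omega)]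

-- the first n-1 tail values row[c] as an index map
theorem valRange (row : List Int) (n : Nat) (h : n ≤ row.length) :
    (PySem.List.pyRange 1 (n : Int) 1).map (fun c => PySem.List.pyGetD row c 0)
      = row.tail.take (n - 1) := by
  apply List.ext_getElem
  · simp [PySem.List.length_pyRange_one]
    omega
  · intro i h1 h2
    simp only [List.getElem_map, PySem.List.getElem_pyRange_one, List.getElem_take,
      List.getElem_tail]
    have hi : i < n - 1 := by
      simpa [PySem.List.length_pyRange_one] using h1
    have e1 : (1 : Int) + (i : Int) = ((i + 1 : Nat) : Int) := by omega
    rw [e1, PySem.List.pyGetD_natCast, List.getD_eq_getElem _ _ (by omega)]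

theorem maskP_append (K : List (List Int)) (row : List Int) (c : Int) :
    maskP (K ++ [row]) c
      = (maskP K c || decide (¬ PySem.List.pyGetD row c 0 = PySem.List.pyGetD row (c - 1) 0)) := by
  simp [maskP, List.any_append]

-- one OR-update step of the mask
theorem maskStep (K : List (List Int)) (row : List Int) (n : Nat) (h : n ≤ row.length) :
    ((maskL K (n : Int)).zip (row.tail.zip row)).map
        (fun p => p.1 || decide (p.2.1 ≠ p.2.2))
      = maskL (K ++ [row]) (n : Int) := by
  rw [zip_take_right]
  have hlen : (maskL K (n : Int)).length = n - 1 := by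
    simp only [maskL, List.length_map, PySem.List.length_pyRange_one]
    omega
  rw [hlen, ← pairRange row n h]
  simp only [maskL, List.zip_map', List.map_map]
  apply List.map_congr_left
  intro c _
  simp [maskP_append]

-- the initial mask from the first row
theorem maskInit (x : List Int) :
    (x.tail.zip x).map (fun p => decide (p.1 ≠ p.2)) = maskL [x] (x.length : Int) := by
  have h := pairRange x x.length le_rfl
  have hfull : (x.tail.zip x).take (x.length - 1) = x.tail.zip x := by
    apply List.take_of_length_le
    simp
  rw [hfull] at h
  rw [← h, List.map_map, maskL]
  apply List.map_congr_left
  intro c _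
  simp [maskP]

-- B's fused fold: kept rows are gDedup, the mask tracks them, prev is the last kept row
theorem foldB (n : Nat) :
    ∀ (ys K : List (List Int)) (p : List Int), (∀ row ∈ ys, n ≤ row.length) →
      ys.foldl
        (fun (s : List (List Int) × List Bool × List Int) row =>
          if row ≠ s.2.2 then
            (s.1 ++ [row],
             (s.2.1.zip (row.tail.zip row)).map (fun p => p.1 || decide (p.2.1 ≠ p.2.2)),
             row)
          else s)
        (K, maskL K (n : Int), p)
      = (K ++ gDedup p ys, maskL (K ++ gDedup p ys) (n : Int), (gDedup p ys).getLastD p) := by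
  intro ys
  induction ys with
  | nil => intro K p _; simp [gDedup]
  | cons y ys ih =>
    intro K p hlen
    simp only [List.foldl_cons]
    by_cases hy : y = p
    · rw [if_neg (by simp [hy])]
      rw [ih K p (fun r hr => hlen r (List.mem_cons_of_mem _ hr))]
      simp [gDedup, hy]
    · rw [if_pos (by simp [hy])]
      rw [maskStep K y n (hlen y (by simp))]
      rw [ih (K ++ [y]) y (fun r hr => hlen r (List.mem_cons_of_mem _ hr))]
      have hg : gDedup p (y :: ys) = y :: gDedup y ys := by simp [gDedup, hy]
      rw [hg, List.getLastD_cons]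
      simp [List.append_assoc]

-- the mask predicate IS A's column-list comparison
theorem maskP_colF (D : List (List Int)) (c : Int) :
    maskP D c = decide (¬ colF D c = colF D (c - 1)) := by
  rw [Bool.eq_iff_iff]
  simp only [maskP, colF, List.any_eq_true, decide_eq_true_eq, List.map_eq_map_iff]
  push Not
  tauto

-- one output row of B equals A's keep-index extraction
theorem rowOut (D : List (List Int)) (n : Nat) (row : List Int) (h : n ≤ row.length) :
    (PySem.List.pyGetD row 0 0 ::
      ((row.tail.zip (maskL D (n : Int))).filter (fun p => p.2)).map (fun p => p.1))
      = (keepL D (n : Int)).map (fun c => PySem.List.pyGetD row c 0) := by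
  simp only [keepL, List.map_cons]
  congr 1
  rw [zip_take_left]
  have hlen : (maskL D (n : Int)).length = n - 1 := by
    simp only [maskL, List.length_map, PySem.List.length_pyRange_one]
    omega
  rw [hlen, ← valRange row n h]
  simp only [maskL, List.zip_map', List.filter_map, List.map_map]
  have hpred : ∀ c : Int,
      ((fun p : Int × Bool => p.2) ∘ fun c => (PySem.List.pyGetD row c 0, maskP D c)) c
        = decide (¬ colF D c = colF D (c - 1)) := fun c => maskP_colF D c
  rw [List.filter_congr (fun c _ => hpred c)]
  rfl

theorem alt_eq_canon (x : List Int) (xs : List (List Int))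
    (hall : ∀ row ∈ x :: xs, x.length ≤ row.length) :
    solve_746b3537_alt (x :: xs) = canonOut (x :: gDedup x xs) (x.length : Int) := by
  simp only [solve_746b3537_alt, PySem.List.slice_from_one, List.tail_cons,
    PySem.List.pyGetD_zero_cons]
  rw [maskInit x]
  rw [foldB x.length xs [x] x (fun r hr => hall r (List.mem_cons_of_mem _ hr))]
  simp only [List.singleton_append]
  apply List.map_congr_left
  intro row hrow
  have hr : x.length ≤ row.length := by
    rcases List.mem_cons.1 hrow with h | h
    · simp [h]
    · exact hall row (List.mem_cons_of_mem _ (mem_gDedup h))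
  have := rowOut (x :: gDedup x xs) x.length row hr
  simpa [canonOut] using this

-- ===== VERDICT (by name: the statement is the Claim_ definition above) =====
theorem solve_746b3537_spec : Claim_equal_solve_746b3537 := by
  intro grid _ hpre
  obtain ⟨hne, -, hall⟩ := hpre
  obtain ⟨x, xs, rfl⟩ := List.exists_cons_of_ne_nil hne
  simp only [List.headD_cons] at hall
  show solve_746b3537 _ = solve_746b3537_alt _
  rw [solve_eq_canon x xs, alt_eq_canon x xs hall]
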